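-- pv_equiv track=rewrite | github.com/Brian2727/LeetCode_Answers_BrianMora | LeetCode/MaxPointFromRemovingStrings.py | maximumGain2
-- ===== SOURCE A (Python) =====
-- def maximumGain2(s, x, y):
--         points = 0
--         partial_string = ""
--         s += " "
--         ab_count = s.count('ab')
--         ba_count = s.count('ba')
--         while ab_count > 0 or ba_count > 0:
--             if y > x:
--                 if ba_count > 0:
--                     s = s.replace('ba', "")
--                     points += y * ba_count
--                     ba_count = s.count('ba')
--                     ab_count = s.count('ab')
--                 elif ab_count > 0:
--                     s = s.replace('ab', "")
--                     points += x * ab_count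
--                     ba_count = s.count('ba')
--                     ab_count = s.count('ab')
--             else:
--                 if ab_count > 0:
--                     s = s.replace('ab', "")
--                     points += x * ab_count
--                     ba_count = s.count('ba')
--                     ab_count = s.count('ab')
--                 elif ba_count > 0:
--                     s = s.replace('ba', "")
--                     points += y * ba_count
--                     ba_count = s.count('ba')
--                     ab_count = s.count('ab')
--         return points
-- ===== SOURCE B (Python) =====
-- def maximumGain2(s, x, y):
--     # one-pass greedy: remove the higher-valued pair with a counter-stack,
--     # matching leftover low pairs per segment
--     if y > x:
--         first, second, hi, lo = 'b', 'a', y, x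
--     else:
--         first, second, hi, lo = 'a', 'b', x, y
--     points = 0
--     open_cnt = 0   # pending `first` chars
--     rest_cnt = 0   # unmatched `second` chars in current segment
--     for c in s:
--         if c == first:
--             open_cnt += 1
--         elif c == second:
--             if open_cnt > 0:
--                 open_cnt -= 1
--                 points += hi
--             else:
--                 rest_cnt += 1
--         else:
--             points += lo * min(open_cnt, rest_cnt)
--             open_cnt = rest_cnt = 0
--     points += lo * min(open_cnt, rest_cnt)
--     return points
-- ===== Notes on version B (the rewrite author's own statement) =====
-- stated objective: alternative
-- what changed: B replaces A's repeated count/replace-until-fixpoint string rewriting with a single left-to-right pass keeping two counters (pending high-pair openers and leftover partners per segment), removing the higher-valued pair on the fly and matching leftover lower pairs at segment ends.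
import Mathlib
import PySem

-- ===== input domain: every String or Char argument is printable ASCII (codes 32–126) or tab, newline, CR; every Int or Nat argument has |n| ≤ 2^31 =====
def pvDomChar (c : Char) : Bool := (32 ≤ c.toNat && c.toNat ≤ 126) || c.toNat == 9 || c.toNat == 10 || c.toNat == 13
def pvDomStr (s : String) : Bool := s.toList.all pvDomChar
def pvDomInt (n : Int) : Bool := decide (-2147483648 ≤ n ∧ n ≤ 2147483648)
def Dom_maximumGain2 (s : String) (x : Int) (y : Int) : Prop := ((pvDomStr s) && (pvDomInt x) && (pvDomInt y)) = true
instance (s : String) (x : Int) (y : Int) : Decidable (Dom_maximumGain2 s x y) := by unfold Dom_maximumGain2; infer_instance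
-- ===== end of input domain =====

-- B replaces A's replace-until-fixpoint loop by a single counter-stack pass
-- (remove the higher-valued pair greedily, match leftover lower pairs per segment); equal return value proved.

-- ===== PORT A =====
-- pvCnt2/pvRep2 are reference forms of s.count(p)/s.replace(p, "") for a two-char
-- pattern p = [u,v]; the length lemma justifies termination of A's while loop.
def pvCnt2 (u v : Char) : List Char → Nat
  | a :: b :: t => if a = u ∧ b = v then pvCnt2 u v t + 1 else pvCnt2 u v (b :: t)
  | _ => 0

def pvRep2 (u v : Char) : List Char → List Char
  | a :: b :: t => if a = u ∧ b = v then pvRep2 u v t else a :: pvRep2 u v (b :: t)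
  | l => l

theorem pvLen_rep2 (u v : Char) (s : List Char) :
    (pvRep2 u v s).length + 2 * pvCnt2 u v s = s.length := by
  fun_induction pvRep2 u v s with
  | case1 a b t h ih => simp [pvCnt2, h]; simp at ih; omega
  | case2 a b t h ih => simp [pvCnt2, h]; simp at ih; omega
  | case3 l h =>
    cases l with
    | nil => simp [pvCnt2]
    | cons a t => cases t with
      | nil => simp [pvCnt2]
      | cons b t' => exact absurd rfl (h a b t')

theorem pvCountgo_eq (u v : Char) : ∀ (fuel : Nat) (l : List Char) (acc : Nat), l.length ≤ fuel →
    PySem.Chars.count.go [u, v] fuel l acc = acc + pvCnt2 u v l := by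
  intro fuel
  induction fuel with
  | zero =>
    intro l acc h
    have hl : l = [] := by cases l <;> simp_all
    subst hl; simp [PySem.Chars.count.go, pvCnt2]
  | succ f ih =>
    intro l acc h
    match l with
    | [] => simp [PySem.Chars.count.go, pvCnt2]
    | [a] =>
      rw [PySem.Chars.count.go]
      have : ([u,v].isPrefixOf [a]) = false := by simp [List.isPrefixOf]
      rw [this]
      simp only [if_neg Bool.false_ne_true]
      cases f <;> simp [PySem.Chars.count.go, pvCnt2]
    | a :: b :: t =>
      rw [PySem.Chars.count.go]
      have hpre : ([u,v].isPrefixOf (a::b::t)) = (u == a && v == b) := by simp [List.isPrefixOf]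
      by_cases hab : a = u ∧ b = v
      · obtain ⟨h1, h2⟩ := hab
        have hb : (u == a && v == b) = true := by rw [h1, h2]; simp
        rw [hpre, hb]
        simp only [if_pos]
        have hd : List.drop ([u,v].length) (a::b::t) = t := rfl
        rw [hd, ih t (acc+1) (by simp at h; omega)]
        have hc : pvCnt2 u v (a::b::t) = pvCnt2 u v t + 1 := by simp [pvCnt2, h1, h2]
        rw [hc]; omega
      · have : (u == a && v == b) = false := by
          rcases not_and_or.mp hab with h' | h' <;> simp [beq_iff_eq] <;> intro e <;> simp_all [eq_comm]
        rw [hpre, this]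
        simp only [if_neg Bool.false_ne_true]
        rw [ih (b::t) acc (by simp at h ⊢; omega)]
        have : ¬(a = u ∧ b = v) := hab
        simp [pvCnt2, this]

theorem pvCount_eq2 (u v : Char) (l : List Char) : PySem.Chars.count l [u, v] = pvCnt2 u v l := by
  rw [PySem.Chars.count]
  simp [pvCountgo_eq u v l.length l 0 (le_refl _)]

theorem pvRepgo_eq (u v : Char) : ∀ (fuel : Nat) (l : List Char) (acc : List Char), l.length ≤ fuel →
    PySem.Chars.replace.go [u, v] [] fuel l acc = acc.reverse ++ pvRep2 u v l := by
  intro fuel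
  induction fuel with
  | zero =>
    intro l acc h
    have hl : l = [] := by cases l <;> simp_all
    subst hl; simp [PySem.Chars.replace.go, pvRep2]
  | succ f ih =>
    intro l acc h
    match l with
    | [] => simp [PySem.Chars.replace.go, pvRep2]
    | [a] =>
      rw [PySem.Chars.replace.go]
      have : ([u,v].isPrefixOf [a]) = false := by simp [List.isPrefixOf]
      rw [this]
      simp only [if_neg Bool.false_ne_true]
      cases f <;> simp [PySem.Chars.replace.go, pvRep2]
    | a :: b :: t =>
      rw [PySem.Chars.replace.go]
      have hpre : ([u,v].isPrefixOf (a::b::t)) = (u == a && v == b) := by simp [List.isPrefixOf]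
      by_cases hab : a = u ∧ b = v
      · obtain ⟨h1, h2⟩ := hab
        have hb : (u == a && v == b) = true := by rw [h1, h2]; simp
        rw [hpre, hb]
        simp only [if_pos]
        have hd : List.drop ([u,v].length) (a::b::t) = t := rfl
        rw [hd]
        have hnew : (([] : List Char).reverse ++ acc) = acc := by simp
        rw [hnew, ih t acc (by simp at h; omega)]
        have hc : pvRep2 u v (a::b::t) = pvRep2 u v t := by simp [pvRep2, h1, h2]
        rw [hc]
      · have : (u == a && v == b) = false := by
          rcases not_and_or.mp hab with h' | h' <;> simp [beq_iff_eq] <;> intro e <;> simp_all [eq_comm]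
        rw [hpre, this]
        simp only [if_neg Bool.false_ne_true]
        rw [ih (b::t) (a :: acc) (by simp at h ⊢; omega)]
        have : ¬(a = u ∧ b = v) := hab
        simp [pvRep2, this]

theorem pvReplace_eq2 (u v : Char) (l : List Char) : PySem.Chars.replace l [u, v] [] = pvRep2 u v l := by
  rw [PySem.Chars.replace]
  simp [pvRepgo_eq u v l.length l [] (le_refl _)]

theorem pvStrCount_eq (u v : Char) (p s : String) (hp : p.toList = [u, v]) :
    PySem.Str.count s p = pvCnt2 u v s.toList := by
  rw [PySem.Str.count, hp, pvCount_eq2]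

theorem pvStrReplace_eq (u v : Char) (p s : String) (hp : p.toList = [u, v]) :
    (PySem.Str.replace s p "").toList = pvRep2 u v s.toList := by
  rw [PySem.Str.toList_replace, hp]
  have : ("" : String).toList = ([] : List Char) := rfl
  rw [this, pvReplace_eq2]

-- the while loop of A: counts are recomputed from the current string exactly as the
-- Python loop body does after every replace
def pvLoopA (x y : Int) (s : String) (points : Int) : Int :=
  let ab_count := PySem.Str.count s "ab"
  let ba_count := PySem.Str.count s "ba"
  if ab_count > 0 ∨ ba_count > 0 then
    if y > x then
      if ba_count > 0 then
        pvLoopA x y (PySem.Str.replace s "ba" "") (points + y * (ba_count : Int))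
      else
        pvLoopA x y (PySem.Str.replace s "ab" "") (points + x * (ab_count : Int))
    else
      if ab_count > 0 then
        pvLoopA x y (PySem.Str.replace s "ab" "") (points + x * (ab_count : Int))
      else
        pvLoopA x y (PySem.Str.replace s "ba" "") (points + y * (ba_count : Int))
  else points
termination_by s.toList.length
decreasing_by
  · rw [pvStrReplace_eq 'b' 'a' "ba" s (by decide)]
    have h1 := pvLen_rep2 'b' 'a' s.toList
    have h2 : PySem.Str.count s "ba" = pvCnt2 'b' 'a' s.toList := pvStrCount_eq 'b' 'a' "ba" s (by decide)
    omega
  · rw [pvStrReplace_eq 'a' 'b' "ab" s (by decide)]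
    have h1 := pvLen_rep2 'a' 'b' s.toList
    have h2 : PySem.Str.count s "ab" = pvCnt2 'a' 'b' s.toList := pvStrCount_eq 'a' 'b' "ab" s (by decide)
    omega
  · rw [pvStrReplace_eq 'a' 'b' "ab" s (by decide)]
    have h1 := pvLen_rep2 'a' 'b' s.toList
    have h2 : PySem.Str.count s "ab" = pvCnt2 'a' 'b' s.toList := pvStrCount_eq 'a' 'b' "ab" s (by decide)
    omega
  · rw [pvStrReplace_eq 'b' 'a' "ba" s (by decide)]
    have h1 := pvLen_rep2 'b' 'a' s.toList
    have h2 : PySem.Str.count s "ba" = pvCnt2 'b' 'a' s.toList := pvStrCount_eq 'b' 'a' "ba" s (by decide)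
    omega

def maximumGain2 (s : String) (x : Int) (y : Int) : Int :=
  let points : Int := 0
  let partial_string : String := ""   -- unused in the Python too
  let s1 := s ++ " "
  pvLoopA x y s1 points

-- ===== PORT B =====
-- one step of Source B's for-loop over the characters; state = (open_cnt, rest_cnt, points)
def pvBStep (first second : Char) (hi lo : Int) (a : Int × Int × Int) (c : Char) : Int × Int × Int :=
  if c = first then (a.1 + 1, a.2.1, a.2.2)
  else if c = second then
    (if a.1 > 0 then (a.1 - 1, a.2.1, a.2.2 + hi) else (a.1, a.2.1 + 1, a.2.2))
  else (0, 0, a.2.2 + lo * min a.1 a.2.1)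

def maximumGain2_alt (s : String) (x : Int) (y : Int) : Int :=
  let p : Char × Char × Int × Int := if y > x then ('b', 'a', y, x) else ('a', 'b', x, y)
  let st := s.toList.foldl (pvBStep p.1 p.2.1 p.2.2.1 p.2.2.2) (0, 0, 0)
  st.2.2 + p.2.2.2 * min st.1 st.2.1

-- ===== PRECONDITION & SPEC =====
def Spec_maximumGain2 (s : String) (x : Int) (y : Int) (out : Int) : Prop := out = maximumGain2_alt s x y
instance (s : String) (x : Int) (y : Int) (out : Int) : Decidable (Spec_maximumGain2 s x y out) := by unfold Spec_maximumGain2; infer_instance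

-- ===== CLAIM (what is proved, stated in full; the proofs are below) =====
def Claim_equal_maximumGain2 : Prop := ∀ (s : String) (x : Int) (y : Int), Dom_maximumGain2 s x y → Spec_maximumGain2 s x y (maximumGain2 s x y)

-- ===== LEMMAS AND PROOFS =====

-- the pair-deletion machine: a stack plus a counter of deleted [u,v] pairs
def pvStep (u v : Char) (a : List Char × Nat) (c : Char) : List Char × Nat :=
  if c = v ∧ a.1.head? = some u then (a.1.tail, a.2 + 1) else (c :: a.1, a.2)

def pvMach (u v : Char) (st : List Char) (k : Nat) (s : List Char) : List Char × Nat :=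
  List.foldl (pvStep u v) (st, k) s

def pvK (u v : Char) (s : List Char) : Nat := (pvMach u v [] 0 s).2

def pvNf (u v : Char) (s : List Char) : List Char := (pvMach u v [] 0 s).1.reverse

theorem pvMach_offset (u v : Char) (s : List Char) : ∀ (st : List Char) (k : Nat),
    pvMach u v st k s = ((pvMach u v st 0 s).1, k + (pvMach u v st 0 s).2) := by
  induction s with
  | nil => intro st k; simp [pvMach]
  | cons c t ih =>
    intro st k
    simp only [pvMach, List.foldl_cons]
    by_cases h : c = v ∧ st.head? = some u
    · rw [show pvStep u v (st, k) c = (st.tail, k + 1) from by simp [pvStep, h],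
          show pvStep u v (st, 0) c = (st.tail, 0 + 1) from by simp [pvStep, h]]
      have e1 := ih st.tail (k+1)
      have e2 := ih st.tail (0+1)
      simp only [pvMach] at e1 e2 ⊢
      rw [e1, e2]
      simp [Prod.ext_iff]; omega
    · rw [show pvStep u v (st, k) c = (c :: st, k) from by simp [pvStep, h],
          show pvStep u v (st, 0) c = (c :: st, 0) from by simp [pvStep, h]]
      exact ih (c :: st) k

theorem pvMach_rep (u v : Char) (huv : u ≠ v) (s : List Char) : ∀ (st : List Char) (k : Nat),
    pvMach u v st (k + pvCnt2 u v s) (pvRep2 u v s) = pvMach u v st k s := by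
  fun_induction pvRep2 u v s with
  | case1 a b t h ih =>
    intro st k
    obtain ⟨h1, h2⟩ := h
    subst h1; subst h2
    have hc : pvCnt2 a b (a :: b :: t) = pvCnt2 a b t + 1 := by simp [pvCnt2]
    rw [hc]
    have step1 : pvStep a b (st, k) a = (a :: st, k) := by
      simp [pvStep, huv]
    have step2 : pvStep a b (a :: st, k) b = (st, k + 1) := by simp [pvStep]
    simp only [pvMach, List.foldl_cons] at *
    rw [step1, step2, ← ih st (k+1)]
    ring_nf
  | case2 a b t h ih =>
    intro st k
    have hc : pvCnt2 u v (a :: b :: t) = pvCnt2 u v (b :: t) := by simp [pvCnt2, h]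
    rw [hc]
    simp only [pvMach, List.foldl_cons] at *
    by_cases hp : a = v ∧ st.head? = some u
    · rw [show pvStep u v (st, k + pvCnt2 u v (b::t)) a = (st.tail, (k+1) + pvCnt2 u v (b::t)) from by
         simp [pvStep, hp]; ring,
         show pvStep u v (st, k) a = (st.tail, k+1) from by simp [pvStep, hp]]
      exact ih st.tail (k+1)
    · rw [show pvStep u v (st, k + pvCnt2 u v (b::t)) a = (a :: st, k + pvCnt2 u v (b::t)) from by
         simp [pvStep, hp],
         show pvStep u v (st, k) a = (a :: st, k) from by simp [pvStep, hp]]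
      exact ih (a :: st) k
  | case3 l h =>
    intro st k
    have hc : pvCnt2 u v l = 0 := by
      cases l with
      | nil => simp [pvCnt2]
      | cons a t => cases t with
        | nil => simp [pvCnt2]
        | cons b t' => exact absurd rfl (h a b t')
    rw [hc]
    simp

theorem pvNf_rep (u v : Char) (huv : u ≠ v) (s : List Char) :
    pvNf u v (pvRep2 u v s) = pvNf u v s := by
  have h := pvMach_rep u v huv s [] 0
  rw [pvMach_offset u v (pvRep2 u v s) [] (0 + pvCnt2 u v s)] at h
  simp only [pvNf, Prod.ext_iff] at *
  rw [h.1]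

theorem pvK_rep (u v : Char) (huv : u ≠ v) (s : List Char) :
    pvK u v (pvRep2 u v s) + pvCnt2 u v s = pvK u v s := by
  have h := pvMach_rep u v huv s [] 0
  rw [pvMach_offset u v (pvRep2 u v s) [] (0 + pvCnt2 u v s)] at h
  simp only [pvK, Prod.ext_iff] at *
  omega

theorem pvCnt2_cons_zero_iff (u v : Char) (c : Char) (t : List Char) :
    pvCnt2 u v (c :: t) = 0 ↔ pvCnt2 u v t = 0 ∧ ¬(c = u ∧ t.head? = some v) := by
  cases t with
  | nil => simp [pvCnt2]
  | cons b t' =>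
    by_cases h : c = u ∧ b = v
    · simp only [pvCnt2, if_pos h]
      constructor
      · intro h1; omega
      · intro ⟨_, h2⟩; exact absurd ⟨h.1, by simp [h.2]⟩ h2
    · have : pvCnt2 u v (c :: b :: t') = pvCnt2 u v (b :: t') := by simp [pvCnt2, h]
      rw [this]
      simp only [List.head?_cons]
      constructor
      · intro h1; exact ⟨h1, fun ⟨hc, hb⟩ => h ⟨hc, by injection hb⟩⟩
      · intro ⟨h1, _⟩; exact h1

theorem pvFold_of_cnt_zero (u v : Char) (s : List Char) : ∀ (st : List Char) (k : Nat),
    pvCnt2 u v s = 0 → (s.head? = some v → st.head? ≠ some u) →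
    List.foldl (pvStep u v) (st, k) s = (s.reverse ++ st, k) := by
  induction s with
  | nil => intro st k _ _; simp
  | cons c t ih =>
    intro st k h hb
    have h' := (pvCnt2_cons_zero_iff u v c t).mp h
    have hstep : pvStep u v (st, k) c = (c :: st, k) := by
      simp only [pvStep]
      rw [if_neg]
      intro ⟨hc, hh⟩
      exact hb (by simp [hc]) hh
    rw [List.foldl_cons, hstep, ih (c :: st) k h'.1]
    · simp
    · intro hv
      simp only [List.head?_cons]
      intro hcu
      exact h'.2 ⟨by injection hcu, hv⟩

theorem pvK_of_cnt_zero (u v : Char) (s : List Char) (h : pvCnt2 u v s = 0) : pvK u v s = 0 := by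
  have := pvFold_of_cnt_zero u v s [] 0 h (by simp)
  simp [pvK, pvMach, this]

theorem pvNf_of_cnt_zero (u v : Char) (s : List Char) (h : pvCnt2 u v s = 0) : pvNf u v s = s := by
  have := pvFold_of_cnt_zero u v s [] 0 h (by simp)
  simp [pvNf, pvMach, this]

theorem pvHead_rep2 (u v : Char) (t : List Char)
    (h : (pvRep2 v u t).head? = some v) : t.head? = some v := by
  fun_induction pvRep2 v u t with
  | case1 a b t' hab ih => simp [hab.1]
  | case2 a b t' hab ih => simp_all
  | case3 l hl => exact h

theorem pvCnt_pres (u v : Char) (s : List Char)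
    (h : pvCnt2 u v s = 0) : pvCnt2 u v (pvRep2 v u s) = 0 := by
  fun_induction pvRep2 v u s with
  | case1 a b t hab ih =>
    obtain ⟨h1, h2⟩ := hab
    rw [h1, h2] at h
    have h3 := (pvCnt2_cons_zero_iff u v v (u :: t)).mp h
    have h4 := (pvCnt2_cons_zero_iff u v u t).mp h3.1
    exact ih h4.1
  | case2 a b t hab ih =>
    have h3 := (pvCnt2_cons_zero_iff u v a (b :: t)).mp h
    have h5 := ih h3.1
    rw [pvCnt2_cons_zero_iff]
    refine ⟨h5, ?_⟩
    intro ⟨ha, hh⟩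
    exact h3.2 ⟨ha, pvHead_rep2 u v (b :: t) hh⟩
  | case3 l hl => exact h

theorem pvBlock (u v : Char) (c : Char) (hc : c ≠ u) (st0 : List Char) (s : List Char) :
    ∀ (A : List Char) (k : Nat),
    List.foldl (pvStep u v) (A ++ c :: st0, k) s =
      ((pvMach u v A k s).1 ++ c :: st0, (pvMach u v A k s).2) := by
  induction s with
  | nil => intro A k; simp [pvMach]
  | cons d t ih =>
    intro A k
    rw [List.foldl_cons]
    simp only [pvMach, List.foldl_cons]
    cases A with
    | nil =>
      have h1 : pvStep u v ([] ++ c :: st0, k) d = (d :: c :: st0, k) := by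
        simp [pvStep]
        intro _ h'
        exact absurd h' hc
      have h2 : pvStep u v (([] : List Char), k) d = (d :: [], k) := by simp [pvStep]
      rw [h1, h2]
      have := ih [d] k
      simpa [pvMach] using this
    | cons a A' =>
      by_cases h : d = v ∧ a = u
      · have h1 : pvStep u v ((a :: A') ++ c :: st0, k) d = (A' ++ c :: st0, k + 1) := by
          simp [pvStep, h]
        have h2 : pvStep u v (a :: A', k) d = (A', k + 1) := by simp [pvStep, h]
        rw [h1, h2]
        have := ih A' (k+1)
        simpa [pvMach] using this
      · have hcond : ¬(d = v ∧ (a :: A' ++ c :: st0).head? = some u) := by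
          simp only [List.cons_append, List.head?_cons]
          intro ⟨hd, hh⟩
          exact h ⟨hd, by injection hh⟩
        have hcond2 : ¬(d = v ∧ (a :: A').head? = some u) := by
          simp only [List.head?_cons]
          intro ⟨hd, hh⟩
          exact h ⟨hd, by injection hh⟩
        have h1 : pvStep u v ((a :: A') ++ c :: st0, k) d = (d :: (a :: A') ++ c :: st0, k) := by
          simp only [pvStep, List.cons_append]
          rw [if_neg (by simpa using hcond)]
        have h2 : pvStep u v (a :: A', k) d = (d :: a :: A', k) := by
          simp only [pvStep]
          rw [if_neg hcond2]
        rw [h1, h2]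
        have := ih (d :: a :: A') k
        simpa [pvMach] using this

theorem pvK_split (u v : Char) (c : Char) (hcu : c ≠ u) (hcv : c ≠ v) (w1 w2 : List Char) :
    pvK u v (w1 ++ c :: w2) = pvK u v w1 + pvK u v w2 := by
  simp only [pvK, pvMach, List.foldl_append, List.foldl_cons]
  have h1 : pvStep u v (List.foldl (pvStep u v) ([], 0) w1) c =
      (c :: (List.foldl (pvStep u v) ([], 0) w1).1, (List.foldl (pvStep u v) ([], 0) w1).2) := by
    simp [pvStep, hcv]
  rw [h1]
  have h2 := pvBlock u v c hcu (List.foldl (pvStep u v) ([], 0) w1).1 w2 []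
      (List.foldl (pvStep u v) ([], 0) w1).2
  simp only [List.nil_append] at h2
  rw [h2]
  rw [pvMach_offset u v w2 [] (List.foldl (pvStep u v) ([], 0) w1).2]
  simp [pvMach]

theorem pvFold_repl_v (u v : Char) (huv : u ≠ v) (r : Nat) : ∀ (st : List Char) (k : Nat),
    List.foldl (pvStep v u) (st, k) (List.replicate r v) = (List.replicate r v ++ st, k) := by
  induction r with
  | zero => intro st k; simp
  | succ r' ih =>
    intro st k
    rw [List.replicate_succ, List.foldl_cons]
    have h1 : pvStep v u (st, k) v = (v :: st, k) := by simp [pvStep, huv.symm]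
    rw [h1, ih (v :: st) k]
    rw [List.append_cons, ← List.replicate_succ', List.replicate_succ]

theorem pvFold_repl_u_blocked (u v : Char) (huv : u ≠ v) (o : Nat) : ∀ (st : List Char) (k : Nat),
    st.head? ≠ some v → (List.foldl (pvStep v u) (st, k) (List.replicate o u)).2 = k := by
  induction o with
  | zero => intro st k _; simp
  | succ o' ih =>
    intro st k hh
    rw [List.replicate_succ, List.foldl_cons]
    have h1 : pvStep v u (st, k) u = (u :: st, k) := by
      simp only [pvStep]
      rw [if_neg]
      intro ⟨_, h'⟩
      exact hh h'
    rw [h1]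
    exact ih (u :: st) k (by simp [huv])

theorem pvFold_repl_u (u v : Char) (huv : u ≠ v) (o : Nat) : ∀ (r k : Nat),
    (List.foldl (pvStep v u) (List.replicate r v, k) (List.replicate o u)).2 = k + min o r := by
  induction o with
  | zero => intro r k; simp
  | succ o' ih =>
    intro r k
    cases r with
    | zero =>
      simp only [List.replicate_zero]
      rw [pvFold_repl_u_blocked u v huv (o'+1) [] k (by simp)]
      simp
    | succ r' =>
      rw [show List.replicate (o'+1) u = u :: List.replicate o' u by rw [List.replicate_succ],
          List.foldl_cons]
      have h1 : pvStep v u (List.replicate (r'+1) v, k) u = (List.replicate r' v, k + 1) := by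
        simp [pvStep, List.replicate_succ]
      rw [h1, ih r' (k+1)]
      omega

theorem pvK_minform (u v : Char) (huv : u ≠ v) (r o : Nat) :
    pvK v u (List.replicate r v ++ List.replicate o u) = min o r := by
  simp only [pvK, pvMach, List.foldl_append]
  rw [pvFold_repl_v u v huv r [] 0]
  simp only [List.append_nil]
  rw [pvFold_repl_u u v huv o r 0]
  omega

theorem pvMach_append_single (u v : Char) (c : Char) (hcv : c ≠ v) (l : List Char) :
    pvMach u v [] 0 (l ++ [c]) = (c :: (pvMach u v [] 0 l).1, (pvMach u v [] 0 l).2) := by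
  simp only [pvMach, List.foldl_append, List.foldl_cons, List.foldl_nil]
  simp [pvStep, hcv]

theorem pvK_append_single (u v : Char) (c : Char) (hcv : c ≠ v) (l : List Char) :
    pvK u v (l ++ [c]) = pvK u v l := by
  simp [pvK, pvMach_append_single u v c hcv l]

theorem pvNf_append_single (u v : Char) (c : Char) (hcv : c ≠ v) (l : List Char) :
    pvNf u v (l ++ [c]) = pvNf u v l ++ [c] := by
  simp [pvNf, pvMach_append_single u v c hcv l]

-- A's loop value: remove the preferred pair to its normal form, then the other pair
theorem pvLoopA_val_y (x y : Int) (hxy : y > x) (n : Nat) : ∀ (s : String) (p : Int),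
    s.toList.length ≤ n →
    pvLoopA x y s p = p + y * (pvK 'b' 'a' s.toList : Int)
      + x * (pvK 'a' 'b' (pvNf 'b' 'a' s.toList) : Int) := by
  induction n with
  | zero =>
    intro s p hlen
    have hl : s.toList = [] := by cases h : s.toList <;> simp_all
    rw [pvLoopA, pvStrCount_eq 'a' 'b' "ab" s (by decide), pvStrCount_eq 'b' 'a' "ba" s (by decide), hl]
    simp [pvCnt2, pvK, pvNf, pvMach]
  | succ n ih =>
    intro s p hlen
    rw [pvLoopA, pvStrCount_eq 'a' 'b' "ab" s (by decide), pvStrCount_eq 'b' 'a' "ba" s (by decide)]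
    by_cases hor : pvCnt2 'a' 'b' s.toList > 0 ∨ pvCnt2 'b' 'a' s.toList > 0
    · rw [if_pos hor, if_pos hxy]
      by_cases hba : pvCnt2 'b' 'a' s.toList > 0
      · rw [if_pos hba]
        have hrep : (PySem.Str.replace s "ba" "").toList = pvRep2 'b' 'a' s.toList :=
          pvStrReplace_eq 'b' 'a' "ba" s (by decide)
        have hlen2 : (PySem.Str.replace s "ba" "").toList.length ≤ n := by
          rw [hrep]; have := pvLen_rep2 'b' 'a' s.toList; omega
        rw [ih _ _ hlen2, hrep, pvNf_rep 'b' 'a' (by decide) s.toList]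
        have hk := pvK_rep 'b' 'a' (by decide) s.toList
        rw [← hk]; push_cast; ring
      · rw [if_neg hba]
        have hab : pvCnt2 'a' 'b' s.toList > 0 := hor.resolve_right hba
        have hba0 : pvCnt2 'b' 'a' s.toList = 0 := by omega
        have hrep : (PySem.Str.replace s "ab" "").toList = pvRep2 'a' 'b' s.toList :=
          pvStrReplace_eq 'a' 'b' "ab" s (by decide)
        have hlen2 : (PySem.Str.replace s "ab" "").toList.length ≤ n := by
          rw [hrep]; have := pvLen_rep2 'a' 'b' s.toList; omega
        rw [ih _ _ hlen2, hrep]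
        have hpres : pvCnt2 'b' 'a' (pvRep2 'a' 'b' s.toList) = 0 := pvCnt_pres 'b' 'a' s.toList hba0
        have hk := pvK_rep 'a' 'b' (by decide) s.toList
        rw [pvK_of_cnt_zero _ _ _ hpres, pvNf_of_cnt_zero _ _ _ hpres,
            pvK_of_cnt_zero _ _ _ hba0, pvNf_of_cnt_zero _ _ _ hba0, ← hk]
        push_cast; ring
    · rw [if_neg hor]
      have hab0 : pvCnt2 'a' 'b' s.toList = 0 := by omega
      have hba0 : pvCnt2 'b' 'a' s.toList = 0 := by omega
      rw [pvK_of_cnt_zero _ _ _ hba0, pvNf_of_cnt_zero _ _ _ hba0, pvK_of_cnt_zero _ _ _ hab0]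
      simp

theorem pvLoopA_val_n (x y : Int) (hxy : ¬ y > x) (n : Nat) : ∀ (s : String) (p : Int),
    s.toList.length ≤ n →
    pvLoopA x y s p = p + x * (pvK 'a' 'b' s.toList : Int)
      + y * (pvK 'b' 'a' (pvNf 'a' 'b' s.toList) : Int) := by
  induction n with
  | zero =>
    intro s p hlen
    have hl : s.toList = [] := by cases h : s.toList <;> simp_all
    rw [pvLoopA, pvStrCount_eq 'a' 'b' "ab" s (by decide), pvStrCount_eq 'b' 'a' "ba" s (by decide), hl]
    simp [pvCnt2, pvK, pvNf, pvMach]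
  | succ n ih =>
    intro s p hlen
    rw [pvLoopA, pvStrCount_eq 'a' 'b' "ab" s (by decide), pvStrCount_eq 'b' 'a' "ba" s (by decide)]
    by_cases hor : pvCnt2 'a' 'b' s.toList > 0 ∨ pvCnt2 'b' 'a' s.toList > 0
    · rw [if_pos hor, if_neg hxy]
      by_cases hab : pvCnt2 'a' 'b' s.toList > 0
      · rw [if_pos hab]
        have hrep : (PySem.Str.replace s "ab" "").toList = pvRep2 'a' 'b' s.toList :=
          pvStrReplace_eq 'a' 'b' "ab" s (by decide)
        have hlen2 : (PySem.Str.replace s "ab" "").toList.length ≤ n := by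
          rw [hrep]; have := pvLen_rep2 'a' 'b' s.toList; omega
        rw [ih _ _ hlen2, hrep, pvNf_rep 'a' 'b' (by decide) s.toList]
        have hk := pvK_rep 'a' 'b' (by decide) s.toList
        rw [← hk]; push_cast; ring
      · rw [if_neg hab]
        have hba : pvCnt2 'b' 'a' s.toList > 0 := hor.resolve_left hab
        have hab0 : pvCnt2 'a' 'b' s.toList = 0 := by omega
        have hrep : (PySem.Str.replace s "ba" "").toList = pvRep2 'b' 'a' s.toList :=
          pvStrReplace_eq 'b' 'a' "ba" s (by decide)
        have hlen2 : (PySem.Str.replace s "ba" "").toList.length ≤ n := by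
          rw [hrep]; have := pvLen_rep2 'b' 'a' s.toList; omega
        rw [ih _ _ hlen2, hrep]
        have hpres : pvCnt2 'a' 'b' (pvRep2 'b' 'a' s.toList) = 0 := pvCnt_pres 'a' 'b' s.toList hab0
        have hk := pvK_rep 'b' 'a' (by decide) s.toList
        rw [pvK_of_cnt_zero _ _ _ hpres, pvNf_of_cnt_zero _ _ _ hpres,
            pvK_of_cnt_zero _ _ _ hab0, pvNf_of_cnt_zero _ _ _ hab0, ← hk]
        push_cast; ring
    · rw [if_neg hor]
      have hab0 : pvCnt2 'a' 'b' s.toList = 0 := by omega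
      have hba0 : pvCnt2 'b' 'a' s.toList = 0 := by omega
      rw [pvK_of_cnt_zero _ _ _ hab0, pvNf_of_cnt_zero _ _ _ hab0, pvK_of_cnt_zero _ _ _ hba0]
      simp

-- B's fold value, with state (o, r, p) corresponding to machine stack u^o ++ v^r
theorem pvBfold_val (u v : Char) (huv : u ≠ v) (hi lo : Int) (s : List Char) :
    ∀ (o r : Nat) (p : Int),
    (let st := s.foldl (pvBStep u v hi lo) ((o : Int), (r : Int), p);
      st.2.2 + lo * min st.1 st.2.1) =
    p + hi * ((pvMach u v (List.replicate o u ++ List.replicate r v) 0 s).2 : Int)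
      + lo * ((pvK v u ((pvMach u v (List.replicate o u ++ List.replicate r v) 0 s).1.reverse)) : Int) := by
  induction s with
  | nil =>
    intro o r p
    dsimp only
    rw [List.foldl_nil]
    have hm : pvMach u v (List.replicate o u ++ List.replicate r v) 0 [] =
        (List.replicate o u ++ List.replicate r v, 0) := rfl
    rw [hm]
    simp only [List.reverse_append, List.reverse_replicate]
    rw [pvK_minform u v huv r o]
    push_cast
    ring
  | cons c t ih =>
    intro o r p
    dsimp only
    rw [List.foldl_cons]
    by_cases hcu : c = u
    · rw [hcu]
      have hstep : pvBStep u v hi lo (((o : Nat) : Int), ((r : Nat) : Int), p) u =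
          (((o + 1 : Nat) : Int), ((r : Nat) : Int), p) := by
        simp [pvBStep]
      have hm : pvMach u v (List.replicate o u ++ List.replicate r v) 0 (u :: t) =
          pvMach u v (List.replicate (o + 1) u ++ List.replicate r v) 0 t := by
        simp only [pvMach, List.foldl_cons]
        congr 1
        simp [pvStep, huv, List.replicate_succ]
      rw [hstep, hm]
      exact ih (o + 1) r p
    · by_cases hcv : c = v
      · rw [hcv]
        cases o with
        | zero =>
          have hstep : pvBStep u v hi lo (((0 : Nat) : Int), ((r : Nat) : Int), p) v =
              (((0 : Nat) : Int), ((r + 1 : Nat) : Int), p) := by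
            simp [pvBStep, Ne.symm huv]
          have hm : pvMach u v (List.replicate 0 u ++ List.replicate r v) 0 (v :: t) =
              pvMach u v (List.replicate 0 u ++ List.replicate (r + 1) v) 0 t := by
            simp only [pvMach, List.foldl_cons]
            congr 1
            simp only [pvStep, List.replicate_zero, List.nil_append]
            rw [if_neg]
            · simp [List.replicate_succ]
            · intro ⟨_, hh⟩
              cases r with
              | zero => simp at hh
              | succ r' => rw [List.replicate_succ] at hh; simp at hh; exact huv hh.symm
          rw [hstep, hm]
          exact ih 0 (r + 1) p
        | succ o' =>
          have hstep : pvBStep u v hi lo (((o' + 1 : Nat) : Int), ((r : Nat) : Int), p) v =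
              (((o' : Nat) : Int), ((r : Nat) : Int), p + hi) := by
            have hpos : ((o' + 1 : Nat) : Int) > 0 := by positivity
            simp only [pvBStep, if_neg (Ne.symm huv), if_pos hpos]
            push_cast
            ring_nf
          have hm : pvMach u v (List.replicate (o' + 1) u ++ List.replicate r v) 0 (v :: t) =
              ((pvMach u v (List.replicate o' u ++ List.replicate r v) 0 t).1,
                1 + (pvMach u v (List.replicate o' u ++ List.replicate r v) 0 t).2) := by
            simp only [pvMach, List.foldl_cons]
            have hstep2 : pvStep u v (List.replicate (o' + 1) u ++ List.replicate r v, 0) v =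
                (List.replicate o' u ++ List.replicate r v, 1) := by
              simp [pvStep, List.replicate_succ]
            rw [hstep2]
            exact pvMach_offset u v t (List.replicate o' u ++ List.replicate r v) 1
          rw [hstep, hm]
          have := ih o' r (p + hi)
          dsimp only at this
          rw [this]
          push_cast
          ring
      · have hstep : pvBStep u v hi lo (((o : Nat) : Int), ((r : Nat) : Int), p) c =
            (((0 : Nat) : Int), ((0 : Nat) : Int), p + lo * min ((o : Nat) : Int) ((r : Nat) : Int)) := by
          simp [pvBStep, hcu, hcv]
        have hstep2 : pvStep u v (List.replicate o u ++ List.replicate r v, 0) c =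
            (c :: (List.replicate o u ++ List.replicate r v), 0) := by
          simp [pvStep, hcv]
        have hm : pvMach u v (List.replicate o u ++ List.replicate r v) 0 (c :: t) =
            ((pvMach u v [] 0 t).1 ++ c :: (List.replicate o u ++ List.replicate r v),
              (pvMach u v [] 0 t).2) := by
          simp only [pvMach, List.foldl_cons]
          rw [hstep2]
          have := pvBlock u v c hcu (List.replicate o u ++ List.replicate r v) t [] 0
          simpa [pvMach] using this
        rw [hstep, hm]
        have := ih 0 0 (p + lo * min ((o : Nat) : Int) ((r : Nat) : Int))
        dsimp only at this
        rw [this]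
        have hrev : ((pvMach u v [] 0 t).1 ++ c :: (List.replicate o u ++ List.replicate r v)).reverse =
            (List.replicate r v ++ List.replicate o u) ++ c :: (pvMach u v [] 0 t).1.reverse := by
          simp [List.reverse_append, List.reverse_replicate, List.append_assoc]
        rw [hrev, pvK_split v u c hcv hcu, pvK_minform u v huv r o]
        have hnf : pvMach u v (List.replicate 0 u ++ List.replicate 0 v) 0 t = pvMach u v [] 0 t := by
          simp [pvMach]
        rw [hnf] at *
        rw [pvK]
        push_cast
        ring

-- ===== VERDICT (by name: the statement is the Claim_ definition above) =====
theorem maximumGain2_spec : Claim_equal_maximumGain2 := by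
  unfold Claim_equal_maximumGain2
  intro s x y _
  unfold Spec_maximumGain2 maximumGain2 maximumGain2_alt
  dsimp only
  have htl : (s ++ " ").toList = s.toList ++ [' '] := by simp
  by_cases hxy : y > x
  · rw [if_pos hxy]
    dsimp only
    rw [pvLoopA_val_y x y hxy (s ++ " ").toList.length (s ++ " ") 0 (le_refl _), htl]
    rw [pvK_append_single 'b' 'a' ' ' (by decide) s.toList,
        pvNf_append_single 'b' 'a' ' ' (by decide) s.toList,
        pvK_append_single 'a' 'b' ' ' (by decide) (pvNf 'b' 'a' s.toList)]
    have hB := pvBfold_val 'b' 'a' (by decide) y x s.toList 0 0 0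
    dsimp only at hB
    simp only [List.replicate_zero, List.nil_append, Nat.cast_zero] at hB
    rw [hB]
    rw [show (pvMach 'b' 'a' [] 0 s.toList).2 = pvK 'b' 'a' s.toList from rfl,
        show (pvMach 'b' 'a' [] 0 s.toList).1.reverse = pvNf 'b' 'a' s.toList from rfl]
  · rw [if_neg hxy]
    dsimp only
    rw [pvLoopA_val_n x y hxy (s ++ " ").toList.length (s ++ " ") 0 (le_refl _), htl]
    rw [pvK_append_single 'a' 'b' ' ' (by decide) s.toList,
        pvNf_append_single 'a' 'b' ' ' (by decide) s.toList,
        pvK_append_single 'b' 'a' ' ' (by decide) (pvNf 'a' 'b' s.toList)]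
    have hB := pvBfold_val 'a' 'b' (by decide) x y s.toList 0 0 0
    dsimp only at hB
    simp only [List.replicate_zero, List.nil_append, Nat.cast_zero] at hB
    rw [hB]
    rw [show (pvMach 'a' 'b' [] 0 s.toList).2 = pvK 'a' 'b' s.toList from rfl,
        show (pvMach 'a' 'b' [] 0 s.toList).1.reverse = pvNf 'a' 'b' s.toList from rfl]
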